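-- pv_equiv track=rewrite | github.com/azazel-ginga/NA_PYTHON | python/training/crazy_python/chapter5/execrise/8.py | fn
-- ===== SOURCE A (Python) =====
-- def fn(n):
--     tul = []
--     x = 1
--     for i in range(int(100 / n)):
--         tul.append([])
--         for j in range(n):
--             tul[i].append(x)
--             x = x + 1
--         tul[i] = tuple(tul[i])
--     return tuple(tul)
-- ===== SOURCE B (Python) =====
-- def fn(n):
--     rows = int(100 / n)
--     flat = list(range(1, rows * n + 1))
--     return tuple(tuple(flat[i * n:(i + 1) * n]) for i in range(rows))
-- ===== Notes on version B (the rewrite author's own statement) =====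
-- stated objective: alternative
-- what changed: Replaces A's interleaved nested loops with a running counter by computing the flat sequence range(1, rows*n+1) once and partitioning it into rows slices of length n.
-- outside the precondition, e.g. on fn(0): A raises ZeroDivisionError, B raises ZeroDivisionError
import Mathlib
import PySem

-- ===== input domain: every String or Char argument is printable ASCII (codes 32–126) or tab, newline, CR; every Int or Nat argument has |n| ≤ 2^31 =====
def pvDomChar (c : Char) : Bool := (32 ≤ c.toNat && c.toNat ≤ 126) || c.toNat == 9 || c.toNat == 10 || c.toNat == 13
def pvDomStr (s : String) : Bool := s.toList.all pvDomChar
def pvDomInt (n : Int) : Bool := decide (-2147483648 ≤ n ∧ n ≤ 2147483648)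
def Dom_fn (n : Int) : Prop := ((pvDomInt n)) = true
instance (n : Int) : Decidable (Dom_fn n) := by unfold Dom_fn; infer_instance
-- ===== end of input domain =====

-- B partitions one flat range into fixed-size slices instead of A's nested accumulate-with-counter loops; objective: alternative decomposition.

-- ===== PORT A =====
-- int(100 / n) is truncated division toward zero; for |n| ≤ 2^31 the float 100/n never
-- rounds across an integer boundary, so it equals Int.tdiv 100 n exactly.
def fn (n : Int) : List (List Int) :=
  let rows := Int.tdiv 100 n
  -- tul = []; x = 1; for i in range(rows): append [], fill with n values of x, tuple it
  let st := (PySem.List.pyRange 0 rows 1).foldl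
    (fun (st : List (List Int) × Int) _i =>
      let inner := (PySem.List.pyRange 0 n 1).foldl
        (fun (p : List Int × Int) _j => (p.1 ++ [p.2], p.2 + 1)) ([], st.2)
      (st.1 ++ [inner.1], inner.2)) ([], 1)
  st.1

-- ===== PORT B =====
def fn_alt (n : Int) : List (List Int) :=
  let rows := Int.tdiv 100 n
  let flat := PySem.List.pyRange 1 (rows * n + 1) 1
  (PySem.List.pyRange 0 rows 1).map
    (fun i => PySem.List.slice flat (some (i * n)) (some ((i + 1) * n)))

-- ===== PRECONDITION & SPEC =====
-- Pre_fn excludes only n = 0, on which Python A raises ZeroDivisionError.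
def Pre_fn (n : Int) : Prop := n ≠ 0
instance (n : Int) : Decidable (Pre_fn n) := by unfold Pre_fn; infer_instance
def pvWitness_fn : Int := (7)
def Spec_fn (n : Int) (out : List (List Int)) : Prop := out = fn_alt n
instance (n : Int) (out : List (List Int)) : Decidable (Spec_fn n out) := by unfold Spec_fn; infer_instance

-- ===== CLAIM (what is proved, stated in full; the proofs are below) =====
def Claim_equal_fn : Prop := ∀ (n : Int), Dom_fn n → Pre_fn n → Spec_fn n (fn n)

-- ===== LEMMAS AND PROOFS =====

lemma fn_empty_of_rows_nonpos (n : Int) (h : Int.tdiv 100 n ≤ 0) : fn n = [] := by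
  simp [fn, PySem.List.pyRange_one_eq_nil h]

lemma fn_alt_empty_of_rows_nonpos (n : Int) (h : Int.tdiv 100 n ≤ 0) : fn_alt n = [] := by
  simp [fn_alt, PySem.List.pyRange_one_eq_nil h]

-- ===== VERDICT (by name: the statement is the Claim_ definition above) =====
set_option maxRecDepth 4000 in
theorem fn_spec : Claim_equal_fn := by
  intro n _hdom hpre
  unfold Spec_fn
  unfold Pre_fn at hpre
  by_cases hpos : 1 ≤ n
  · by_cases hle : n ≤ 100
    · interval_cases n <;> decide
    · have h : Int.tdiv 100 n = 0 := Int.tdiv_eq_zero_of_lt (by norm_num) (by omega)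
      rw [fn_empty_of_rows_nonpos n (le_of_eq h), fn_alt_empty_of_rows_nonpos n (le_of_eq h)]
  · have hneg : n < 0 := by omega
    have h : Int.tdiv 100 n ≤ 0 := by
      have h1 : Int.tdiv 100 n = -(Int.tdiv 100 (-n)) := by
        rw [← Int.tdiv_neg, neg_neg]
      have h2 : 0 ≤ Int.tdiv 100 (-n) := Int.tdiv_nonneg (by norm_num) (by omega)
      omega
    rw [fn_empty_of_rows_nonpos n h, fn_alt_empty_of_rows_nonpos n h]
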